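-- pv_equiv track=rewrite | github.com/buhman/dreamcast | gen/k_means/python/decode_pvrt.py | from_xy
-- ===== SOURCE A (Python) =====
-- def log2(n):
--     if n == 1:
--         return 0
--     if n == 2:
--         return 1
--     if n == 4:
--         return 2
--     if n == 8:
--         return 3
--     if n == 16:
--         return 4
--     if n == 32:
--         return 5
--     if n == 64:
--         return 6
--     if n == 128:
--         return 7
--     if n == 256:
--         return 8
--     if n == 512:
--         return 9
--     if n == 1024:
--         return 10
--     assert False, n
--
-- def from_xy(x, y, width, height):
--     # maximum texture size       : 1024x1024
--     # maximum 1-dimensional index: 0xfffff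
--     # bits                       : 19-0
--
--     # y bits: 0, 2, 4, 6, 8, 10, 12, 14, 16, 18
--     # x bits: 1, 3, 5, 7, 9, 11, 13, 15, 17, 19
--
--     width_max = log2(width);
--     height_max = log2(height);
--
--     twiddle_ix = 0
--     i = 0
--     while i < (20 / 2):
--         if i < width_max and i < height_max:
--             twiddle_ix |= ((y >> i) & 1) << (i * 2 + 0)
--             twiddle_ix |= ((x >> i) & 1) << (i * 2 + 1)
--         elif i < width_max:
--             twiddle_ix |= ((x >> i) & 1) << (i + height_max)
--         elif i < height_max:
--             twiddle_ix |= ((y >> i) & 1) << (i + width_max)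
--         else:
--             break
--         i += 1
--
--     return twiddle_ix
-- ===== SOURCE B (Python) =====
-- def log2(n):
--     if n == 1:
--         return 0
--     if n == 2:
--         return 1
--     if n == 4:
--         return 2
--     if n == 8:
--         return 3
--     if n == 16:
--         return 4
--     if n == 32:
--         return 5
--     if n == 64:
--         return 6
--     if n == 128:
--         return 7
--     if n == 256:
--         return 8
--     if n == 512:
--         return 9
--     if n == 1024:
--         return 10
--     assert False, n
--
-- def from_xy(x, y, width, height):
--     w = log2(width)
--     h = log2(height)
--     m = min(w, h)
--     # pure Morton section: two bits per step, accumulated by addition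
--     t = 0
--     for i in range(m):
--         t += (((y >> i) % 2) + 2 * ((x >> i) % 2)) << (2 * i)
--     # residual high bits of the longer axis, as one modulo/shift (no per-bit loop)
--     if h < w:
--         t += ((x >> m) % (1 << (w - m))) << (2 * m)
--     elif w < h:
--         t += ((y >> m) % (1 << (h - m))) << (2 * m)
--     return t
-- ===== Notes on version B (the rewrite author's own statement) =====
-- stated objective: alternative
-- what changed: Replaces A's single 10-iteration while-loop with three-way branching and bitwise OR accumulation by a two-phase computation: a pure Morton loop over min(log2 w, log2 h) bits using additive accumulation, then the residual high bits of the longer axis collapsed into one modulo-and-shift expression instead of a per-bit loop.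
import Mathlib
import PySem

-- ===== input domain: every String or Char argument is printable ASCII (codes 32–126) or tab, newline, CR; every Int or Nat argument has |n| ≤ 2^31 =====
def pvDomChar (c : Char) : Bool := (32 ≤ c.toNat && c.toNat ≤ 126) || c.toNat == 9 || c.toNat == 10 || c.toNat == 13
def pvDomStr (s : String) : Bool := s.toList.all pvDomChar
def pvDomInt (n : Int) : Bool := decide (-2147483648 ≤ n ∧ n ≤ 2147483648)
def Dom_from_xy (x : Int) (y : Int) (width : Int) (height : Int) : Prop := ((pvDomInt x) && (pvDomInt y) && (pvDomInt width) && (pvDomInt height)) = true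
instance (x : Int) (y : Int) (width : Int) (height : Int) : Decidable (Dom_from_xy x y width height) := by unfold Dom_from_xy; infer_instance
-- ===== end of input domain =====

-- B replaces A's single branchy while-loop by a Morton loop over the shorter axis plus one
-- closed-form modulo/shift for the residual high bits (objective: alternative decomposition).

-- ===== PORT A =====
-- log2: returns none exactly where the Python assert fires (AssertionError; excluded by Pre_)
def pvLog2A (n : Int) : Option Nat :=
  if n = 1 then some 0
  else if n = 2 then some 1
  else if n = 4 then some 2
  else if n = 8 then some 3
  else if n = 16 then some 4
  else if n = 32 then some 5
  else if n = 64 then some 6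
  else if n = 128 then some 7
  else if n = 256 then some 8
  else if n = 512 then some 9
  else if n = 1024 then some 10
  else none

-- the while-loop of A; `while i < (20 / 2)` compares i with the float 10.0, i.e. with 10
def pvLoopA (x y : Int) (wmax hmax : Nat) (t : Int) (i : Nat) : Int :=
  if _h : i < 10 then
    if i < wmax ∧ i < hmax then
      pvLoopA x y wmax hmax
        (PySem.Int.bor (PySem.Int.bor t ((PySem.Int.band (y >>> i) 1) <<< (i * 2 + 0)))
          ((PySem.Int.band (x >>> i) 1) <<< (i * 2 + 1))) (i + 1)
    else if i < wmax then
      pvLoopA x y wmax hmax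
        (PySem.Int.bor t ((PySem.Int.band (x >>> i) 1) <<< (i + hmax))) (i + 1)
    else if i < hmax then
      pvLoopA x y wmax hmax
        (PySem.Int.bor t ((PySem.Int.band (y >>> i) 1) <<< (i + wmax))) (i + 1)
    else t  -- break
  else t
termination_by 10 - i
decreasing_by all_goals omega

def from_xy (x : Int) (y : Int) (width : Int) (height : Int) : Int :=
  match pvLog2A width, pvLog2A height with
  | some width_max, some height_max => pvLoopA x y width_max height_max 0 0
  | _, _ => 0  -- Python raises AssertionError here; excluded by Pre_from_xy

-- ===== PORT B =====
-- (B reuses the module-level helper log2, ported once above as pvLog2A)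
-- for i in range(m): t += (((y >> i) % 2) + 2 * ((x >> i) % 2)) << (2 * i)
def pvMortonB (x y : Int) (m : Nat) : Int :=
  (List.range m).foldl
    (fun (t : Int) (i : Nat) => t + (PySem.Int.mod (y >>> i) 2 + 2 * PySem.Int.mod (x >>> i) 2) <<< (2 * i)) 0

def from_xy_alt (x : Int) (y : Int) (width : Int) (height : Int) : Int :=
  match pvLog2A width with
  | none => 0  -- Python raises AssertionError here; excluded by Pre_from_xy
  | some w =>
  match pvLog2A height with
  | none => 0  -- Python raises AssertionError here; excluded by Pre_from_xy
  | some h =>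
    let m := min w h
    let t := pvMortonB x y m
    if h < w then t + (PySem.Int.mod (x >>> m) (1 <<< (w - m))) <<< (2 * m)
    else if w < h then t + (PySem.Int.mod (y >>> m) (1 <<< (h - m))) <<< (2 * m)
    else t

-- ===== PRECONDITION & SPEC =====
-- Pre_ excludes exactly the inputs where log2's `assert False` fires (AssertionError):
-- width and height must each be a power of two between 1 and 1024.
def Pre_from_xy (x : Int) (y : Int) (width : Int) (height : Int) : Prop :=
  (width = 1 ∨ width = 2 ∨ width = 4 ∨ width = 8 ∨ width = 16 ∨ width = 32 ∨ width = 64 ∨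
    width = 128 ∨ width = 256 ∨ width = 512 ∨ width = 1024) ∧
  (height = 1 ∨ height = 2 ∨ height = 4 ∨ height = 8 ∨ height = 16 ∨ height = 32 ∨ height = 64 ∨
    height = 128 ∨ height = 256 ∨ height = 512 ∨ height = 1024)
instance (x : Int) (y : Int) (width : Int) (height : Int) : Decidable (Pre_from_xy x y width height) := by
  unfold Pre_from_xy; infer_instance

def pvWitness_from_xy : Int × Int × Int × Int := (3, 5, 8, 4)

def Spec_from_xy (x : Int) (y : Int) (width : Int) (height : Int) (out : Int) : Prop := out = from_xy_alt x y width height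
instance (x : Int) (y : Int) (width : Int) (height : Int) (out : Int) : Decidable (Spec_from_xy x y width height out) := by unfold Spec_from_xy; infer_instance

-- ===== CLAIM (what is proved, stated in full; the proofs are below) =====
def Claim_equal_from_xy : Prop := ∀ (x : Int) (y : Int) (width : Int) (height : Int), Dom_from_xy x y width height → Pre_from_xy x y width height → Spec_from_xy x y width height (from_xy x y width height)

-- ===== LEMMAS AND PROOFS =====

-- bit i of z, as Python computes it: (z >> i) % 2 = (z >> i) & 1
def pvBit (z : Int) (i : Nat) : Int := PySem.Int.mod (z >>> i) 2

-- the Morton part: sum of the two-bit digits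
def pvS (x y : Int) (i : Nat) : Int :=
  ∑ j ∈ Finset.range i, (pvBit y j + 2 * pvBit x j) * 4 ^ j

-- the residual contribution of the longer axis
def pvR (x y : Int) (w h : Nat) : Int :=
  if h < w then PySem.Int.mod (x >>> min w h) (2 ^ (w - min w h)) * 2 ^ (2 * min w h)
  else if w < h then PySem.Int.mod (y >>> min w h) (2 ^ (h - min w h)) * 2 ^ (2 * min w h)
  else 0

-- `t | (c << k)` is `t + c * 2^k` when t fits below bit k and both are nonnegative
lemma pv_or2add (t c : Int) (k : Nat) (ht : 0 ≤ t) (htk : t < 2 ^ k) (hc : 0 ≤ c) :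
    PySem.Int.bor t (c <<< k) = t + c * 2 ^ k := by
  rw [Int.shiftLeft_eq]
  rw [PySem.Int.bor_of_nonneg ht (by positivity)]
  obtain ⟨a, rfl⟩ := Int.eq_ofNat_of_zero_le ht
  obtain ⟨b, rfl⟩ := Int.eq_ofNat_of_zero_le hc
  have hb : ((b : Int) * 2 ^ k) = ((b * 2 ^ k : Nat) : Int) := by push_cast; ring
  rw [hb, Int.toNat_natCast, Int.toNat_natCast]
  have ha : a < 2 ^ k := by exact_mod_cast htk
  have : a ||| b * 2 ^ k = a + b * 2 ^ k := by
    rw [← Nat.shiftLeft_eq, Nat.lor_comm, ← Nat.shiftLeft_add_eq_or_of_lt ha, Nat.shiftLeft_eq]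
    ring
  rw [this]; push_cast; ring

-- splitting off the low bit of a modulus by a power of two
lemma pv_modsplit (a : Int) (n : Nat) :
    PySem.Int.mod a (2 ^ (n + 1)) = PySem.Int.mod a 2 + 2 * PySem.Int.mod (a >>> (1 : Nat)) (2 ^ n) := by
  have h2 : (0:Int) < 2 ^ (n+1) := by positivity
  have hn : (0:Int) < 2 ^ n := by positivity
  rw [PySem.Int.mod_eq_emod_of_pos h2, PySem.Int.mod_eq_emod_of_pos (by norm_num),
    PySem.Int.mod_eq_emod_of_pos hn, Int.shiftRight_eq_div_pow]
  norm_num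
  have hq := Int.emod_add_mul_ediv a 2
  have hqn := Int.emod_add_mul_ediv (a / 2) (2 ^ n)
  have hr0 : 0 ≤ a % 2 := Int.emod_nonneg a (by norm_num)
  have hr2 : a % 2 < 2 := Int.emod_lt_of_pos a (by norm_num)
  have h0 : 0 ≤ (a / 2) % 2 ^ n := Int.emod_nonneg _ (by positivity)
  have h1 : (a / 2) % 2 ^ n < 2 ^ n := Int.emod_lt_of_pos _ hn
  have key : a = (a % 2 + 2 * ((a / 2) % 2 ^ n)) + 2 ^ (n+1) * ((a/2) / 2 ^ n) := by
    rw [pow_succ]; linarith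
  calc a % 2 ^ (n+1)
      = ((a % 2 + 2 * ((a / 2) % 2 ^ n)) + 2 ^ (n+1) * ((a/2) / 2 ^ n)) % 2 ^ (n+1) := by
        conv_lhs => rw [key]
    _ = (a % 2 + 2 * ((a / 2) % 2 ^ n)) % 2 ^ (n+1) := by
        rw [mul_comm]; exact Int.add_mul_emod_self_left ..
    _ = a % 2 + 2 * ((a / 2) % 2 ^ n) := by
        apply Int.emod_eq_of_lt (by linarith)
        rw [pow_succ]; linarith

lemma pvS_succ (x y : Int) (i : Nat) :
    pvS x y (i + 1) = pvS x y i + (pvBit y i + 2 * pvBit x i) * 4 ^ i :=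
  Finset.sum_range_succ _ _

lemma pvMortonB_eq_pvS (x y : Int) (m : Nat) : pvMortonB x y m = pvS x y m := by
  induction m with
  | zero => simp [pvMortonB, pvS]
  | succ m ih =>
    unfold pvMortonB at *
    rw [List.range_succ, List.foldl_append, ih, List.foldl_cons, List.foldl_nil, pvS_succ]
    have h4 : ((2:Int)) ^ (2*m) = 4 ^ m := by rw [pow_mul]; norm_num
    rw [Int.shiftLeft_eq, h4]
    rfl

-- A's loop after the interleaved phase, x-residual case
lemma pvLoopA_residual_x (x y : Int) (w h : Nat) (hw : w ≤ 10) :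
    ∀ n i t, w - i = n → h ≤ i → i ≤ w → 0 ≤ t → t < 2 ^ (i + h) →
      pvLoopA x y w h t i = t + PySem.Int.mod (x >>> i) (2 ^ (w - i)) * 2 ^ (i + h) := by
  intro n
  induction n with
  | zero =>
    intro i t hn hhi hiw ht0 htb
    have hmod : PySem.Int.mod (x >>> i) (2 ^ (w - i)) = 0 := by
      have : w - i = 0 := hn
      rw [this, pow_zero, PySem.Int.mod_eq_emod_of_pos (by norm_num), Int.emod_one]
    rw [pvLoopA, hmod]
    have c1 : ¬(i < w ∧ i < h) := by omega
    have c2 : ¬(i < w) := by omega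
    have c3 : ¬(i < h) := by omega
    by_cases h10 : i < 10 <;> simp [h10, c2, c3]
  | succ n ihn =>
    intro i t hn hhi hiw ht0 htb
    have hiw' : i < w := by omega
    have h10 : i < 10 := by omega
    have c1 : ¬(i < w ∧ i < h) := by omega
    rw [pvLoopA, dif_pos h10, if_neg c1, if_pos hiw', PySem.Int.band_one,
      pv_or2add t _ (i + h) ht0 htb (PySem.Int.mod_nonneg _ (by norm_num))]
    have hp : (0:Int) < 2 ^ (i + h) := by positivity
    have hm0 : 0 ≤ PySem.Int.mod (x >>> i) 2 := PySem.Int.mod_nonneg _ (by norm_num)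
    have hm2 : PySem.Int.mod (x >>> i) 2 < 2 := PySem.Int.mod_lt _ (by norm_num)
    have hpow : (2:Int) ^ (i + 1 + h) = 2 * 2 ^ (i + h) := by ring
    rw [ihn (i+1) _ (by omega) (by omega) (by omega)
      (by nlinarith) (by rw [hpow]; nlinarith)]
    obtain ⟨k, hk⟩ : ∃ k, w - i - 1 = k := ⟨_, rfl⟩
    have e1 : w - (i + 1) = k := by omega
    have e2 : w - i = k + 1 := by omega
    rw [e1, e2, pv_modsplit]
    have hsh : x >>> i >>> (1:Nat) = x >>> (i + 1) := (Int.shiftRight_add x i 1).symm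
    rw [hsh, hpow]; ring

-- A's loop after the interleaved phase, y-residual case
lemma pvLoopA_residual_y (x y : Int) (w h : Nat) (hh : h ≤ 10) :
    ∀ n i t, h - i = n → w ≤ i → i ≤ h → 0 ≤ t → t < 2 ^ (i + w) →
      pvLoopA x y w h t i = t + PySem.Int.mod (y >>> i) (2 ^ (h - i)) * 2 ^ (i + w) := by
  intro n
  induction n with
  | zero =>
    intro i t hn hwi hih ht0 htb
    have hmod : PySem.Int.mod (y >>> i) (2 ^ (h - i)) = 0 := by
      have : h - i = 0 := hn
      rw [this, pow_zero, PySem.Int.mod_eq_emod_of_pos (by norm_num), Int.emod_one]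
    rw [pvLoopA, hmod]
    have c1 : ¬(i < w ∧ i < h) := by omega
    have c2 : ¬(i < w) := by omega
    have c3 : ¬(i < h) := by omega
    by_cases h10 : i < 10 <;> simp [h10, c2, c3]
  | succ n ihn =>
    intro i t hn hwi hih ht0 htb
    have hih' : i < h := by omega
    have h10 : i < 10 := by omega
    have c1 : ¬(i < w ∧ i < h) := by omega
    have c2 : ¬(i < w) := by omega
    rw [pvLoopA, dif_pos h10, if_neg c1, if_neg c2, if_pos hih', PySem.Int.band_one,
      pv_or2add t _ (i + w) ht0 htb (PySem.Int.mod_nonneg _ (by norm_num))]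
    have hp : (0:Int) < 2 ^ (i + w) := by positivity
    have hm0 : 0 ≤ PySem.Int.mod (y >>> i) 2 := PySem.Int.mod_nonneg _ (by norm_num)
    have hm2 : PySem.Int.mod (y >>> i) 2 < 2 := PySem.Int.mod_lt _ (by norm_num)
    have hpow : (2:Int) ^ (i + 1 + w) = 2 * 2 ^ (i + w) := by ring
    rw [ihn (i+1) _ (by omega) (by omega) (by omega)
      (by nlinarith) (by rw [hpow]; nlinarith)]
    obtain ⟨k, hk⟩ : ∃ k, h - i - 1 = k := ⟨_, rfl⟩
    have e1 : h - (i + 1) = k := by omega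
    have e2 : h - i = k + 1 := by omega
    rw [e1, e2, pv_modsplit]
    have hsh : y >>> i >>> (1:Nat) = y >>> (i + 1) := (Int.shiftRight_add y i 1).symm
    rw [hsh, hpow]; ring

-- A's loop, interleaved phase
lemma pvLoopA_phase1 (x y : Int) (w h : Nat) (hw : w ≤ 10) (hh : h ≤ 10) :
    ∀ n i t, min w h - i = n → i ≤ min w h → 0 ≤ t → t < 4 ^ i →
      pvLoopA x y w h t i = t + (pvS x y (min w h) - pvS x y i) + pvR x y w h := by
  intro n
  induction n with
  | zero =>
    intro i t hn him ht0 htb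
    have him' : i = min w h := by omega
    subst him'
    rcases lt_trichotomy h w with hlt | heq | hgt
    · have hmin : min w h = h := by omega
      rw [hmin] at htb ⊢
      have htb' : t < 2 ^ (h + h) := by
        have : (4:Int) ^ h = 2 ^ (h + h) := by rw [← two_mul, pow_mul]; norm_num
        rwa [this] at htb
      rw [pvLoopA_residual_x x y w h hw (w - h) h t rfl le_rfl (by omega) ht0 htb']
      unfold pvR
      rw [if_pos hlt, hmin]
      have : 2 * h = h + h := by omega
      rw [this]
      ring
    · have hmin : min w h = w := by omega
      rw [hmin]
      have hR : pvR x y w h = 0 := by unfold pvR; rw [if_neg (by omega), if_neg (by omega)]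
      rw [hR, pvLoopA]
      have c1 : ¬(w < w ∧ w < h) := by omega
      have c2 : ¬(w < w) := by omega
      have c3 : ¬(w < h) := by omega
      by_cases h10 : w < 10 <;> simp [h10, c3]
    · have hmin : min w h = w := by omega
      rw [hmin] at htb ⊢
      have htb' : t < 2 ^ (w + w) := by
        have : (4:Int) ^ w = 2 ^ (w + w) := by rw [← two_mul, pow_mul]; norm_num
        rwa [this] at htb
      rw [pvLoopA_residual_y x y w h hh (h - w) w t rfl le_rfl (by omega) ht0 htb']
      unfold pvR
      rw [if_neg (by omega), if_pos hgt, hmin]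
      have : 2 * w = w + w := by omega
      rw [this]
      ring
  | succ n ihn =>
    intro i t hn him ht0 htb
    have hiw : i < w := by omega
    have hih : i < h := by omega
    have h10 : i < 10 := by omega
    rw [pvLoopA, dif_pos h10, if_pos ⟨hiw, hih⟩]
    have h4 : (2:Int) ^ (i * 2 + 0) = 4 ^ i := by
      rw [Nat.add_zero, mul_comm, pow_mul]; norm_num
    have h4' : (2:Int) ^ (i * 2 + 1) = 2 * 4 ^ i := by
      rw [pow_succ, mul_comm i 2, pow_mul]; ring_nf
    have hp : (0:Int) < 4 ^ i := by positivity
    have hy0 : 0 ≤ PySem.Int.mod (y >>> i) 2 := PySem.Int.mod_nonneg _ (by norm_num)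
    have hy2 : PySem.Int.mod (y >>> i) 2 < 2 := PySem.Int.mod_lt _ (by norm_num)
    have hx0 : 0 ≤ PySem.Int.mod (x >>> i) 2 := PySem.Int.mod_nonneg _ (by norm_num)
    have hx2 : PySem.Int.mod (x >>> i) 2 < 2 := PySem.Int.mod_lt _ (by norm_num)
    rw [PySem.Int.band_one, PySem.Int.band_one,
      pv_or2add t _ (i * 2 + 0) ht0 (by rw [h4]; exact htb) hy0]
    rw [pv_or2add _ _ (i * 2 + 1) (by nlinarith) (by rw [h4']; nlinarith [h4]) hx0]
    have hb4 : (4:Int) ^ (i + 1) = 4 * 4 ^ i := by ring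
    rw [ihn (i + 1) _ (by omega) (by omega) (by nlinarith [h4, h4'])
      (by rw [hb4]; nlinarith [h4, h4'])]
    rw [pvS_succ]
    unfold pvBit
    rw [h4, h4']
    ring

-- main bridge for valid exponents
lemma pv_main (x y : Int) (w h : Nat) (hw : w ≤ 10) (hh : h ≤ 10) :
    pvLoopA x y w h 0 0 =
      (if h < w then pvMortonB x y (min w h) + (PySem.Int.mod (x >>> min w h) (1 <<< (w - min w h))) <<< (2 * min w h)
       else if w < h then pvMortonB x y (min w h) + (PySem.Int.mod (y >>> min w h) (1 <<< (h - min w h))) <<< (2 * min w h)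
       else pvMortonB x y (min w h)) := by
  rw [pvLoopA_phase1 x y w h hw hh (min w h) 0 0 (by omega) (by omega) le_rfl (by norm_num)]
  have hS0 : pvS x y 0 = 0 := by simp [pvS]
  rw [hS0, pvMortonB_eq_pvS]
  have hone : ∀ k : Nat, (((1 <<< k : Nat) : Int)) = 2 ^ k := by
    intro k; rw [Nat.shiftLeft_eq, one_mul]; push_cast; rfl
  unfold pvR
  split_ifs with hc1 hc2
  · rw [hone, Int.shiftLeft_eq]; ring
  · rw [hone, Int.shiftLeft_eq]; ring
  · ring

lemma pvLog2A_cases (v : Int)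
    (hv : v = 1 ∨ v = 2 ∨ v = 4 ∨ v = 8 ∨ v = 16 ∨ v = 32 ∨ v = 64 ∨
      v = 128 ∨ v = 256 ∨ v = 512 ∨ v = 1024) :
    ∃ k, pvLog2A v = some k ∧ k ≤ 10 := by
  rcases hv with rfl | rfl | rfl | rfl | rfl | rfl | rfl | rfl | rfl | rfl | rfl
  · exact ⟨0, by decide, by omega⟩
  · exact ⟨1, by decide, by omega⟩
  · exact ⟨2, by decide, by omega⟩
  · exact ⟨3, by decide, by omega⟩
  · exact ⟨4, by decide, by omega⟩
  · exact ⟨5, by decide, by omega⟩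
  · exact ⟨6, by decide, by omega⟩
  · exact ⟨7, by decide, by omega⟩
  · exact ⟨8, by decide, by omega⟩
  · exact ⟨9, by decide, by omega⟩
  · exact ⟨10, by decide, by omega⟩

-- ===== VERDICT (by name: the statement is the Claim_ definition above) =====
theorem from_xy_spec : Claim_equal_from_xy := by
  intro x y width height _hdom hpre
  obtain ⟨w, hW, hw⟩ := pvLog2A_cases width hpre.1
  obtain ⟨h, hH, hh⟩ := pvLog2A_cases height hpre.2
  show from_xy x y width height = from_xy_alt x y width height
  simp only [from_xy, from_xy_alt, hW, hH]
  exact pv_main x y w h hw hh
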